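-- pv_equiv track=rewrite | github.com/keepnotes-ai/keep | keep/config.py | _ollama_pick_models
-- ===== SOURCE A (Python) =====
-- def _ollama_pick_models(models: list[str]) -> tuple[str, str | None]:
--     """Choose the best Ollama models for embeddings and summarization.
--
--     Returns (embed_model, chat_model). chat_model is None if only
--     embedding-specific models are available.
--     """
--     # Separate embedding-specific models from generative models
--     embed_models = []
--     generative_models = []
--     for m in models:
--         base = m.split(":")[0]
--         if "embed" in base:
--             embed_models.append(m)
--         else:
--             generative_models.append(m)
--
--     # For embeddings: prefer dedicated embedding model, else first available
--     embed_model = embed_models[0] if embed_models else models[0]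
--
--     # For summarization: need a generative model (embedding models can't generate text)
--     chat_model = generative_models[0] if generative_models else None
--
--     return embed_model, chat_model
-- ===== SOURCE B (Python) =====
-- def _ollama_pick_models(models: list[str]) -> tuple[str, str | None]:
--     """Choose the best Ollama models for embeddings and summarization."""
--     # First-match searches instead of partitioning into two lists.
--     embed_model = next((m for m in models if "embed" in m.split(":")[0]), None)
--     if embed_model is None:
--         embed_model = models[0]
--     chat_model = next((m for m in models if "embed" not in m.split(":")[0]), None)
--     return embed_model, chat_model
-- ===== Notes on version B (the rewrite author's own statement) =====
-- stated objective: idiomatic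
-- what changed: Replaced the single loop that partitions models into embed/generative lists with two independent first-match searches (next over a generator), keeping the same 'embed' in m.split(':')[0] predicate.
import Mathlib
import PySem

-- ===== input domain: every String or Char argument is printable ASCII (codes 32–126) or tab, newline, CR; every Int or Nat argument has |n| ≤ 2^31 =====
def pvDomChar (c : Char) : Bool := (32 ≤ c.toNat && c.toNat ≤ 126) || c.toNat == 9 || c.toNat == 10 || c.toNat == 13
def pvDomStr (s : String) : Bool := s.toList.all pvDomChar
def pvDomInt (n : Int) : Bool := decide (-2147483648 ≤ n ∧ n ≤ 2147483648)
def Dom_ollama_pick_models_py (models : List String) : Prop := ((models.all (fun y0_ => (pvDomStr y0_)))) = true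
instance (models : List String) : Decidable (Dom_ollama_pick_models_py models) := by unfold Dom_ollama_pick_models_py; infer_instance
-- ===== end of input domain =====

-- B selects by two first-match scans instead of A's single partitioning loop; same predicate.

-- shared predicate: "embed" in m.split(":")[0] (both Pythons contain this exact expression)
def pvIsEmbed (m : String) : Bool :=
  PySem.Str.isIn "embed" ((((PySem.Str.split? m ":").getD [])).headD "")

-- ===== PORT A =====
def ollama_pick_models_py (models : List String) : String × Option String :=
  -- the partitioning loop
  let acc := models.foldl
    (fun (acc : List String × List String) m =>
      if pvIsEmbed m then (acc.1 ++ [m], acc.2) else (acc.1, acc.2 ++ [m]))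
    ([], [])
  -- embed_models[0] if embed_models else models[0] (models[0] raises on []; excluded by Pre_)
  let embed_model := match acc.1 with
    | e :: _ => e
    | [] => models.headD ""
  let chat_model : Option String := match acc.2 with
    | g :: _ => some g
    | [] => none
  (embed_model, chat_model)

-- ===== PORT B =====
def ollama_pick_models_py_alt (models : List String) : String × Option String :=
  let embed_model := match models.find? pvIsEmbed with
    | some m => m
    | none => models.headD ""   -- models[0]; raises on [] in Python, excluded by Pre_
  let chat_model := models.find? (fun m => !pvIsEmbed m)
  (embed_model, chat_model)

-- ===== PRECONDITION & SPEC =====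
-- A raises IndexError (models[0]) when models is empty and no embed model exists; since
-- models = [] is the only such input, Pre_ excludes exactly the empty list.
def Pre_ollama_pick_models_py (models : List String) : Prop := models ≠ []
instance (models : List String) : Decidable (Pre_ollama_pick_models_py models) := by
  unfold Pre_ollama_pick_models_py; infer_instance
def pvWitness_ollama_pick_models_py : List String := ["nomic-embed-text:latest", "llama3:8b"]

def Spec_ollama_pick_models_py (models : List String) (out : String × Option String) : Prop :=
  out = ollama_pick_models_py_alt models
instance (models : List String) (out : String × Option String) :
    Decidable (Spec_ollama_pick_models_py models out) := by
  unfold Spec_ollama_pick_models_py; infer_instance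

-- ===== CLAIM (what is proved, stated in full; the proofs are below) =====
def Claim_equal_ollama_pick_models_py : Prop :=
  ∀ (models : List String), Dom_ollama_pick_models_py models →
    Pre_ollama_pick_models_py models →
    Spec_ollama_pick_models_py models (ollama_pick_models_py models)

-- ===== LEMMAS AND PROOFS =====

-- the partitioning fold produces the two filters
theorem pv_fold_partition (models : List String) (a b : List String) :
    models.foldl
      (fun (acc : List String × List String) m =>
        if pvIsEmbed m then (acc.1 ++ [m], acc.2) else (acc.1, acc.2 ++ [m]))
      (a, b)
    = (a ++ models.filter pvIsEmbed, b ++ models.filter (fun m => !pvIsEmbed m)) := by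
  induction models generalizing a b with
  | nil => simp
  | cons x xs ih =>
    simp only [List.foldl_cons, List.filter_cons]
    by_cases h : pvIsEmbed x <;> simp [h, ih]

-- first match = head of filter
theorem pv_find_eq_head_filter (p : String → Bool) (l : List String) :
    l.find? p = (l.filter p).head? := by
  induction l with
  | nil => rfl
  | cons x xs ih =>
    by_cases h : p x <;> simp [List.find?_cons, List.filter_cons, h]

-- ===== VERDICT (by name: the statement is the Claim_ definition above) =====
theorem ollama_pick_models_py_spec : Claim_equal_ollama_pick_models_py := by
  intro models _ _
  unfold Spec_ollama_pick_models_py ollama_pick_models_py ollama_pick_models_py_alt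
  simp only [pv_fold_partition, List.nil_append,
    pv_find_eq_head_filter pvIsEmbed models,
    pv_find_eq_head_filter (fun m => !pvIsEmbed m) models]
  cases models.filter pvIsEmbed <;>
  cases models.filter (fun m => !pvIsEmbed m) <;> simp
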